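-- pv_equiv track=rewrite | github.com/siddg97/aima-python | a3_q1.py | make_cols
-- ===== SOURCE A (Python) =====
-- def make_cols(n):
-- 	"""returns a list of columns for the nxn chess board"""
-- 	cols = []
-- 	for i in range(1,n+1):
-- 		c = [i]
-- 		for j in range(i+n,n*n + 1,n):
-- 			c.append(j)
-- 		cols.append(c)
-- 	return cols
-- ===== SOURCE B (Python) =====
-- def make_cols(n):
--     """returns a list of columns for the nxn chess board"""
--     rows = [range(k * n + 1, k * n + n + 1) for k in range(n)]
--     return [list(col) for col in zip(*rows)]
-- ===== Notes on version B (the rewrite author's own statement) =====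
-- stated objective: alternative
-- what changed: B builds the board row-major first (each row a lazy range of n consecutive numbers) and obtains the columns by transposing with zip(*rows), instead of A's per-column inner loop that steps through the board with stride n and appends element by element.
import Mathlib
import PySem

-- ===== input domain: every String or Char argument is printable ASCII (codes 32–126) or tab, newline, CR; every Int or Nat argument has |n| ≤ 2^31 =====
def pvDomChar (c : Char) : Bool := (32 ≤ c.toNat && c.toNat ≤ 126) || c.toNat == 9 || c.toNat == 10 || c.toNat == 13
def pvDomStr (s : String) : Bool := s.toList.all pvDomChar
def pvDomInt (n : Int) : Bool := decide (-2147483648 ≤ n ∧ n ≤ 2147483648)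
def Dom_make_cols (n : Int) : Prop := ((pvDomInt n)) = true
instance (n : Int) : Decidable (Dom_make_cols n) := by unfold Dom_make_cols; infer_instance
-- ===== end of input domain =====

-- B builds the board row-major and transposes it, instead of A's stride-n inner loop per column; same O(n^2) cost, different decomposition.

-- ===== PORT A =====
def make_cols (n : Int) : List (List Int) :=
  (PySem.List.pyRange 1 (n + 1) 1).foldl
    (fun cols i =>
      cols ++ [(PySem.List.pyRange (i + n) (n * n + 1) n).foldl
        (fun c j => c ++ [j]) [i]])
    []

-- ===== PORT B =====
-- faithful port of Python's zip(*rows) for lists of Int: take heads while every row is nonempty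
def pyZipT (rows : List (List Int)) : List (List Int) :=
  match rows with
  | [] => []
  | r :: rs =>
    if h : (r :: rs).all (fun row => !row.isEmpty) then
      (r :: rs).map (fun row => row.headD 0) :: pyZipT ((r :: rs).map List.tail)
    else []
termination_by (rows.headD []).length
decreasing_by
  simp only [List.all_cons, Bool.and_eq_true, Bool.not_eq_eq_eq_not, Bool.not_true] at h
  simp only [List.map_cons, List.headD_cons]
  have : r ≠ [] := by
    intro hr; subst hr; simp at h
  cases r with
  | nil => exact absurd rfl this
  | cons a t => simp

def make_cols_alt (n : Int) : List (List Int) :=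
  pyZipT ((PySem.List.pyRange 0 n 1).map
    (fun k => PySem.List.pyRange (k * n + 1) (k * n + n + 1) 1))

-- ===== PRECONDITION & SPEC =====
def Spec_make_cols (n : Int) (out : List (List Int)) : Prop := out = make_cols_alt n
instance (n : Int) (out : List (List Int)) : Decidable (Spec_make_cols n out) := by unfold Spec_make_cols; infer_instance

-- ===== CLAIM (what is proved, stated in full; the proofs are below) =====
def Claim_equal_make_cols : Prop := ∀ (n : Int), Dom_make_cols n → Spec_make_cols n (make_cols n)

-- ===== LEMMAS AND PROOFS =====

-- appending elements one by one is mapping-and-appending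
theorem foldl_append_map {A B : Type} (f : A -> B) (xs : List A) (init : List B) :
    xs.foldl (fun acc x => acc ++ [f x]) init = init ++ xs.map f := by
  induction xs generalizing init with
  | nil => simp
  | cons a t ih => simp [List.foldl_cons, ih]

-- pyZipT on a rectangular matrix is the index-wise transpose
theorem pyZipT_rect (m : Nat) :
    ∀ (cs : List (List Int)), cs ≠ [] -> (∀ r ∈ cs, r.length = m) ->
      pyZipT cs = (List.range m).map (fun j => cs.map (fun r => r.getD j 0)) := by
  induction m with
  | zero =>
    intro cs hne hlen
    match cs with
    | [] => exact absurd rfl hne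
    | r :: rs =>
      have hr : r = [] := List.eq_nil_of_length_eq_zero (hlen r (by simp))
      subst hr
      simp [pyZipT]
  | succ m ih =>
    intro cs hne hlen
    match cs with
    | [] => exact absurd rfl hne
    | r :: rs =>
      have hall : (r :: rs).all (fun row => !row.isEmpty) = true := by
        simp only [List.all_eq_true, Bool.not_eq_eq_eq_not, Bool.not_true,
          List.isEmpty_eq_false_iff]
        intro row hrow
        have := hlen row hrow
        intro hnil; subst hnil; simp at this
      rw [pyZipT, dif_pos hall]
      have htail : pyZipT ((r :: rs).map List.tail) =
          (List.range m).map (fun j => ((r :: rs).map List.tail).map (fun r => r.getD j 0)) := by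
        apply ih
        · simp
        · intro t ht
          rcases List.mem_map.mp ht with ⟨row, hrow, rfl⟩
          have := hlen row hrow
          simp [List.length_tail, this]
      rw [htail, List.range_succ_eq_map, List.map_cons]
      congr 1
      · show List.map (fun row => row.headD 0) (r :: rs) = List.map (fun r => r.getD 0 0) (r :: rs)
        apply List.map_congr_left
        intro row _
        cases row <;> simp
      · rw [List.map_map]
        apply List.map_congr_left
        intro j _
        simp only [Function.comp_apply]
        rw [List.map_map]
        apply List.map_congr_left
        intro row _
        cases row <;> simp

-- the inner range of A has exactly n-1 elements with stride n
theorem inner_range_eq (n i : Int) (hn : 0 < n) (hi1 : 1 ≤ i) (hin : i ≤ n) :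
    PySem.List.pyRange (i + n) (n * n + 1) n =
      (List.range (n - 1).toNat).map (fun t : Nat => i + n + n * (t : Int)) := by
  rw [PySem.List.pyRange_of_pos _ _ hn]
  have hcount : (if i + n < n * n + 1 then ((n * n + 1 - (i + n) + n - 1) / n).toNat else 0)
      = (n - 1).toNat := by
    by_cases hlt : i + n < n * n + 1
    · rw [if_pos hlt]
      have hdiv : (n * n + 1 - (i + n) + n - 1) / n = n - 1 := by
        have hexp : n * n + 1 - (i + n) + n - 1 = (n - i) + (n - 1) * n := by ring
        rw [hexp, Int.add_mul_ediv_right _ _ (by omega : n ≠ 0),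
          Int.ediv_eq_zero_of_lt (by omega) (by omega)]
        omega
      rw [hdiv]
    · rw [if_neg hlt]
      have hn1 : n = 1 := by nlinarith
      subst hn1
      omega
  rw [hcount]

-- closed form of A's port (for n > 0)
theorem make_cols_closed (n : Int) (hn : 0 < n) :
    make_cols n =
      (List.range n.toNat).map (fun j : Nat =>
        (List.range n.toNat).map (fun k : Nat => (k : Int) * n + 1 + (j : Int))) := by
  unfold make_cols
  rw [foldl_append_map, List.nil_append, PySem.List.pyRange_one, List.map_map]
  have hcnt : (n + 1 - 1).toNat = n.toNat := by omega
  rw [hcnt]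
  apply List.map_congr_left
  intro j hj
  have hj' : (j : Int) < n := by
    have := List.mem_range.mp hj; omega
  simp only [Function.comp_apply]
  rw [inner_range_eq n (1 + j) hn (by omega) (by omega), foldl_append_map]
  obtain ⟨m, hm⟩ : ∃ m : Nat, n.toNat = m + 1 := ⟨n.toNat - 1, by omega⟩
  rw [hm, List.range_succ_eq_map]
  have hm' : (n - 1).toNat = m := by omega
  rw [hm', List.map_cons, List.singleton_append, List.map_map, List.map_map]
  congr 1
  all_goals first
    | (apply List.map_congr_left; intro t _; simp only [Function.comp_apply]; push_cast; ring)
    | (push_cast; ring)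

-- closed form of B's port (for n > 0)
theorem make_cols_alt_closed (n : Int) (hn : 0 < n) :
    make_cols_alt n =
      (List.range n.toNat).map (fun j : Nat =>
        (List.range n.toNat).map (fun k : Nat => (k : Int) * n + 1 + (j : Int))) := by
  unfold make_cols_alt
  have hne : (PySem.List.pyRange 0 n 1).map
      (fun k => PySem.List.pyRange (k * n + 1) (k * n + n + 1) 1) ≠ [] := by
    simp only [ne_eq, List.map_eq_nil_iff]
    rw [PySem.List.pyRange_one]
    simp only [List.map_eq_nil_iff, List.range_eq_nil]
    omega
  have hlen : ∀ r ∈ (PySem.List.pyRange 0 n 1).map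
      (fun k => PySem.List.pyRange (k * n + 1) (k * n + n + 1) 1), r.length = n.toNat := by
    intro r hr
    rcases List.mem_map.mp hr with ⟨k, _, rfl⟩
    rw [PySem.List.length_pyRange_one]
    omega
  rw [pyZipT_rect n.toNat _ hne hlen]
  apply List.map_congr_left
  intro j hj
  have hj' : j < n.toNat := List.mem_range.mp hj
  simp only [PySem.List.pyRange_one, List.map_map]
  have h0 : (n - 0).toNat = n.toNat := by omega
  rw [h0]
  apply List.map_congr_left
  intro k _
  simp only [Function.comp_apply]
  rw [List.getD_eq_getElem _ _ (by simp; omega)]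
  simp only [List.getElem_map, List.getElem_range]
  ring

-- ===== VERDICT (by name: the statement is the Claim_ definition above) =====
theorem make_cols_spec : Claim_equal_make_cols := by
  intro n _
  unfold Spec_make_cols
  by_cases hn : 0 < n
  · rw [make_cols_closed n hn, make_cols_alt_closed n hn]
  · have h1 : PySem.List.pyRange 1 (n + 1) 1 = [] :=
      PySem.List.pyRange_one_eq_nil (by omega)
    have h2 : PySem.List.pyRange 0 n 1 = [] :=
      PySem.List.pyRange_one_eq_nil (by omega)
    simp [make_cols, make_cols_alt, h1, h2, pyZipT]
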